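-- pv_equiv track=rewrite | github.com/iustinpericica/Advanced-Algorithms | Lab6/pb2.py | poly_monotonic_x
-- ===== SOURCE A (Python) =====
-- def poly_monotonic_x(poly_points):
--   nr_points = len(poly_points)
--   nr_local_minimums = 0
--
--   for i in range(0, nr_points):
--     predecesor_point = poly_points[i - 1]
--     current_point = poly_points[i]
--     succesor_point = 0
--     if i + 1 < nr_points:
--         succesor_point = poly_points[i+1]
--     else: succesor_point = poly_points[0]
--
--     if current_point[0] < succesor_point[0] and current_point[0] < predecesor_point[0]:
--         nr_local_minimums += 1
--
--   return nr_local_minimums == 1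
-- ===== SOURCE B (Python) =====
-- def poly_monotonic_x(poly_points):
--     # classify each cyclic edge (previous point -> point) as Descent/Ascent/Equal,
--     # then delegate to str.count: exactly one "DA" pattern in the cyclic sign string
--     prev = poly_points[-1:] + poly_points[:-1]
--     signs = ''.join(
--         'D' if p[0] < q[0] else 'A' if p[0] > q[0] else 'E'
--         for p, q in zip(poly_points, prev))
--     return (signs + signs[:1]).count('DA') == 1
-- ===== Notes on version B (the rewrite author's own statement) =====
-- stated objective: alternative
-- what changed: B encodes each cyclic edge of the polygon as a sign character D/A/E, builds that sign string once, and reduces the local-minimum test to substring counting — (signs + first char).count('DA') == 1 — instead of A's per-index loop that re-reads predecessor, current and successor points and compares x-coordinates at every index.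
import Mathlib
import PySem

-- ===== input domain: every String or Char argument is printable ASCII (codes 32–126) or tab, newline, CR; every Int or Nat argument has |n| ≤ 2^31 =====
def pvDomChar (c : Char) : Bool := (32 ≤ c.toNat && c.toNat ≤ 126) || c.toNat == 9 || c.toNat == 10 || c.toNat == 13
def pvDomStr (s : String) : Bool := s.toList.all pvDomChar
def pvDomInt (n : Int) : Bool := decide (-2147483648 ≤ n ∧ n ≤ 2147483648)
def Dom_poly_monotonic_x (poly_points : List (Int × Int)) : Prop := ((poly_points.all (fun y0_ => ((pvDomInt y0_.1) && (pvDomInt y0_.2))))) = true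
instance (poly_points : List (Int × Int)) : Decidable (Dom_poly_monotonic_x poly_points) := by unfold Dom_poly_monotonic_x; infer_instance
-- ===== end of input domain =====

-- B builds a cyclic edge-sign string (D/A/E) and counts occurrences of the substring "DA" via str.count, instead of A's per-index three-point comparison loop (alternative decomposition, same cost).


-- ===== PORT A =====
-- indices i-1, i, i+1 read inside the loop are always in Python's admitted range, so pyGetD's default (0, 0) is never read
def poly_monotonic_x (poly_points : List (Int × Int)) : Bool :=
  let nr_points : Int := poly_points.length
  let nr_local_minimums : Int :=
    (PySem.List.pyRange 0 nr_points).foldl (fun acc i =>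
      let predecesor_point := PySem.List.pyGetD poly_points (i - 1) (0, 0)
      let current_point := PySem.List.pyGetD poly_points i (0, 0)
      let succesor_point :=
        if i + 1 < nr_points then PySem.List.pyGetD poly_points (i + 1) (0, 0)
        else PySem.List.pyGetD poly_points 0 (0, 0)
      if current_point.1 < succesor_point.1 ∧ current_point.1 < predecesor_point.1
      then acc + 1 else acc) 0
  nr_local_minimums == 1

-- ===== PORT B =====
-- the joined Python string is kept as its List Char; PySem.Chars.count is str.count (Str.count_eq)
def poly_monotonic_x_alt (poly_points : List (Int × Int)) : Bool :=
  let prev := PySem.List.slice poly_points (some (-1)) none ++ PySem.List.slice poly_points none (some (-1))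
  let signs : List Char := (poly_points.zip prev).map (fun pq =>
    if pq.1.1 < pq.2.1 then 'D' else if pq.1.1 > pq.2.1 then 'A' else 'E')
  PySem.Chars.count (signs ++ signs.take 1) ['D', 'A'] == 1

-- ===== PRECONDITION & SPEC =====
def Spec_poly_monotonic_x (poly_points : List (Int × Int)) (out : Bool) : Prop := out = poly_monotonic_x_alt poly_points
instance (poly_points : List (Int × Int)) (out : Bool) : Decidable (Spec_poly_monotonic_x poly_points out) := by unfold Spec_poly_monotonic_x; infer_instance

-- ===== CLAIM (what is proved, stated in full; the proofs are below) =====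
def Claim_equal_poly_monotonic_x : Prop := ∀ (poly_points : List (Int × Int)), Dom_poly_monotonic_x poly_points → Spec_poly_monotonic_x poly_points (poly_monotonic_x poly_points)

-- ===== LEMMAS AND PROOFS =====

-- x-coordinate read at a (possibly negative) Python index
def pvX (poly : List (Int × Int)) (j : Int) : Int :=
  (PySem.List.pyGetD poly j (0, 0)).1

-- the sign character of cyclic edge k (x[k] versus x[k-1], index -1 wrapping to the end)
def pvSgn (poly : List (Int × Int)) (k : Nat) : Char :=
  if pvX poly k < pvX poly ((k : Int) - 1) then 'D'
  else if pvX poly ((k : Int) - 1) < pvX poly k then 'A' else 'E'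

-- adjacent count of the pattern 'D','A' in a char list
def pvDA : List Char → Nat
  | a :: b :: t => (if a = 'D' ∧ b = 'A' then 1 else 0) + pvDA (b :: t)
  | _ => 0

theorem pvX_neg_one (poly : List (Int × Int)) (h : poly ≠ []) :
    pvX poly (-1) = pvX poly ((poly.length : Int) - 1) := by
  have hlen : (1 : Nat) ≤ poly.length := List.length_pos_iff.mpr h
  simp [pvX, PySem.List.pyGetD, PySem.List.pyGet?, PySem.List.pyIdx?, hlen]

theorem pvSgn_D (poly : List (Int × Int)) (k : Nat) :
    pvSgn poly k = 'D' ↔ pvX poly k < pvX poly ((k : Int) - 1) := by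
  unfold pvSgn
  split_ifs with h1 h2 <;> simp_all

theorem pvSgn_A (poly : List (Int × Int)) (k : Nat) :
    pvSgn poly k = 'A' ↔ pvX poly ((k : Int) - 1) < pvX poly k := by
  unfold pvSgn
  split_ifs with h1 h2 <;> simp_all <;> omega


theorem pvDA_skip (t : List Char) : pvDA ('A' :: t) = pvDA t := by
  cases t with
  | nil => rfl
  | cons b t' => simp [pvDA]

theorem pvGo_eq_pvDA (fuel : Nat) : ∀ (l : List Char) (acc : Nat), l.length ≤ fuel →
    PySem.Chars.count.go ['D', 'A'] fuel l acc = acc + pvDA l := by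
  induction fuel with
  | zero =>
    intro l acc h
    have : l = [] := by
      cases l with
      | nil => rfl
      | cons c t => simp at h
    subst this
    simp [PySem.Chars.count.go.eq_def, pvDA]
  | succ fuel ih =>
    intro l acc h
    cases l with
    | nil => simp [PySem.Chars.count.go.eq_def, pvDA]
    | cons c t =>
      rw [PySem.Chars.count.go.eq_def]
      simp only []
      by_cases hp : List.isPrefixOf ['D', 'A'] (c :: t) = true
      · obtain ⟨t', rfl, rfl⟩ : ∃ t', t = 'A' :: t' ∧ c = 'D' := by
          cases t with
          | nil => simp [List.isPrefixOf] at hp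
          | cons b t' =>
            simp only [List.isPrefixOf, Bool.and_eq_true, beq_iff_eq] at hp
            exact ⟨t', by rw [← hp.2.1], hp.1.symm⟩
        rw [if_pos hp]
        have hdrop : List.drop (['D', 'A'] : List Char).length ('D' :: 'A' :: t') = t' := by
          simp
        rw [hdrop, ih t' (acc + 1) (by simp at h ⊢; omega)]
        have hda : pvDA ('D' :: 'A' :: t') = 1 + pvDA t' := by
          simp [pvDA, pvDA_skip]
        omega
      · rw [if_neg hp]
        rw [ih t acc (by simp at h; omega)]
        have ht : pvDA (c :: t) = pvDA t := by
          cases t with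
          | nil => rfl
          | cons b t' =>
            have hno : ¬ (c = 'D' ∧ b = 'A') := by
              intro hcb
              obtain ⟨h1, h2⟩ := hcb
              subst h1; subst h2
              simp [List.isPrefixOf] at hp
            simp [pvDA, hno]
        omega

theorem pvCount_eq_pvDA (l : List Char) :
    PySem.Chars.count l ['D', 'A'] = pvDA l := by
  rw [PySem.Chars.count]
  simpa using pvGo_eq_pvDA l.length l 0 le_rfl

-- counting 'DA' adjacencies in map f [k..k+n) ++ [w] as a countP over the indices
theorem pvDA_chain (f : Nat → Char) (w : Char) :
    ∀ (n k : Nat),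
      pvDA ((List.range' k n).map f ++ [w]) =
      (List.range' k n).countP (fun i =>
        decide (f i = 'D' ∧ (if i + 1 < k + n then f (i + 1) else w) = 'A')) := by
  intro n
  induction n with
  | zero => intro k; simp [pvDA]
  | succ m ihm =>
    intro k
    rw [List.range'_succ]
    cases m with
    | zero =>
      simp only [List.range'_zero, List.map_cons, List.map_nil, List.countP_cons,
        List.countP_nil]
      have hb : ¬ (k + 1 < k + (0 + 1)) := by omega
      by_cases hda : f k = 'D' ∧ w = 'A' <;> simp [pvDA, hda]
    | succ m' =>
      have hbound : k + (m' + 1 + 1) = (k + 1) + (m' + 1) := by omega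
      rw [hbound, List.countP_cons]
      have hexp : (List.range' (k + 1) (m' + 1)).map f
          = f (k + 1) :: (List.range' (k + 2) m').map f := by
        rw [List.range'_succ]; rfl
      simp only [List.map_cons, List.cons_append]
      rw [hexp]
      show (if f k = 'D' ∧ f (k + 1) = 'A' then 1 else 0) +
          pvDA (f (k + 1) :: ((List.range' (k + 2) m').map f ++ [w])) = _
      have hfold : f (k + 1) :: ((List.range' (k + 2) m').map f ++ [w])
          = (List.range' (k + 1) (m' + 1)).map f ++ [w] := by
        rw [hexp]; rfl
      rw [hfold, ihm (k + 1)]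
      have hlt : k + 1 < k + 1 + (m' + 1) := by omega
      simp only [hlt, if_true, decide_eq_true_eq]
      split_ifs <;> omega

-- the signs list B builds is (range n).map (pvSgn poly)
theorem pvSigns_eq (poly : List (Int × Int)) (hne : poly ≠ []) :
    (poly.zip (PySem.List.slice poly (some (-1)) none ++ PySem.List.slice poly none (some (-1)))).map
      (fun pq => if pq.1.1 < pq.2.1 then 'D' else if pq.1.1 > pq.2.1 then 'A' else 'E')
    = (List.range poly.length).map (pvSgn poly) := by
  have hlen : 1 ≤ poly.length := List.length_pos_iff.mpr hne
  rw [PySem.List.slice_from_neg_one, PySem.List.slice_to_neg_one]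
  apply List.ext_getElem
  · simp only [List.length_map, List.length_zip, List.length_append, List.length_drop,
      List.length_dropLast, List.length_range]
    omega
  · intro i h1 h2
    have hprevlen : (List.drop (poly.length - 1) poly ++ poly.dropLast).length = poly.length := by
      simp only [List.length_append, List.length_drop, List.length_dropLast]
      omega
    have hi : i < poly.length := by
      simp only [List.length_map, List.length_zip, hprevlen, Nat.min_self] at h1
      omega
    have hzl : i < (poly.zip (List.drop (poly.length - 1) poly ++ poly.dropLast)).length := by
      simp only [List.length_zip, hprevlen, Nat.min_self]
      omega
    rw [List.getElem_map, List.getElem_map, List.getElem_zip, List.getElem_range]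
    have hprev : (List.drop (poly.length - 1) poly ++ poly.dropLast)[i]'(by omega) =
        PySem.List.pyGetD poly ((i : Int) - 1) (0, 0) := by
      cases i with
      | zero =>
        rw [List.getElem_append_left (by simp only [List.length_drop]; omega)]
        rw [List.getElem_drop]
        have hidx : PySem.List.pyIdx? poly.length (-1 : Int) = some (poly.length - 1) := by
          simp only [PySem.List.pyIdx?]
          have hx1 : ¬ ((0 : Int) ≤ -1) := by omega
          have hx2 : -(poly.length : Int) ≤ -1 := by omega
          rw [if_neg hx1, if_pos hx2]
          norm_num
        have h4 : poly.length - 1 < poly.length := by omega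
        have hz : ((0 : Nat) : Int) - 1 = (-1 : Int) := by omega
        rw [hz]
        simp [PySem.List.pyGetD, PySem.List.pyGet?, hidx, List.getElem?_eq_getElem h4]
      | succ j =>
        have hjlt : j < poly.dropLast.length := by
          simp only [List.length_dropLast]; omega
        rw [List.getElem_append_right (by simp only [List.length_drop]; omega)]
        have hd : (j + 1) - (List.drop (poly.length - 1) poly).length = j := by
          simp only [List.length_drop]; omega
        simp only [hd]
        rw [List.getElem_dropLast]
        have hcast : ((j + 1 : Nat) : Int) - 1 = ((j : Nat) : Int) := by omega
        rw [hcast, PySem.List.pyGetD_natCast]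
        simp [List.getD_eq_getElem?_getD, List.getElem?_eq_getElem (by omega : j < poly.length)]
    rw [hprev]
    have hcur : poly[i]'hi = PySem.List.pyGetD poly (i : Int) (0, 0) := by
      rw [PySem.List.pyGetD_natCast]
      simp [List.getD_eq_getElem?_getD, List.getElem?_eq_getElem hi]
    rw [hcur]
    simp only [pvSgn, pvX, gt_iff_lt]
    rfl

-- B's count as a countP over indices
theorem pvAlt_count (poly : List (Int × Int)) (hne : poly ≠ []) :
    PySem.Chars.count
      (((poly.zip (PySem.List.slice poly (some (-1)) none ++ PySem.List.slice poly none (some (-1)))).map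
        (fun pq => if pq.1.1 < pq.2.1 then 'D' else if pq.1.1 > pq.2.1 then 'A' else 'E'))
       ++ (((poly.zip (PySem.List.slice poly (some (-1)) none ++ PySem.List.slice poly none (some (-1)))).map
        (fun pq => if pq.1.1 < pq.2.1 then 'D' else if pq.1.1 > pq.2.1 then 'A' else 'E')).take 1))
      ['D', 'A']
    = (List.range poly.length).countP (fun i =>
        decide (pvSgn poly i = 'D' ∧
          (if i + 1 < poly.length then pvSgn poly (i + 1) else pvSgn poly 0) = 'A')) := by
  have hlen : 1 ≤ poly.length := List.length_pos_iff.mpr hne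
  rw [pvSigns_eq poly hne, pvCount_eq_pvDA]
  have htake : ((List.range poly.length).map (pvSgn poly)).take 1 = [pvSgn poly 0] := by
    obtain ⟨m, hm⟩ : ∃ m, poly.length = m + 1 := ⟨poly.length - 1, by omega⟩
    rw [hm, List.range_succ_eq_map]
    simp
  rw [htake, List.range_eq_range', pvDA_chain (pvSgn poly) (pvSgn poly 0) poly.length 0]
  simp

-- A's count as the same countP
theorem pvA_count (poly : List (Int × Int)) :
    (PySem.List.pyRange 0 (poly.length : Int)).foldl (fun acc i =>
      let predecesor_point := PySem.List.pyGetD poly (i - 1) (0, 0)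
      let current_point := PySem.List.pyGetD poly i (0, 0)
      let succesor_point :=
        if i + 1 < (poly.length : Int) then PySem.List.pyGetD poly (i + 1) (0, 0)
        else PySem.List.pyGetD poly 0 (0, 0)
      if current_point.1 < succesor_point.1 ∧ current_point.1 < predecesor_point.1
      then acc + 1 else acc) 0
    = ((List.range poly.length).countP (fun i =>
        decide (pvSgn poly i = 'D' ∧
          (if i + 1 < poly.length then pvSgn poly (i + 1) else pvSgn poly 0) = 'A')) : Int) := by
  simp only []
  rw [PySem.List.foldl_ite_add_one
    (fun i => (PySem.List.pyGetD poly i (0, 0)).1 <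
        (if i + 1 < (poly.length : Int) then PySem.List.pyGetD poly (i + 1) (0, 0)
         else PySem.List.pyGetD poly 0 (0, 0)).1 ∧
      (PySem.List.pyGetD poly i (0, 0)).1 < (PySem.List.pyGetD poly (i - 1) (0, 0)).1)]
  rw [PySem.List.pyRange_zero_natCast, List.countP_map]
  simp only [Int.zero_add]
  congr 1
  apply List.countP_congr
  intro k hk
  rw [List.mem_range] at hk
  have hne : poly ≠ [] := by
    intro h; subst h; simp at hk
  have hlen : 1 ≤ poly.length := List.length_pos_iff.mpr hne
  simp only [Function.comp, decide_eq_true_eq]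
  rw [pvSgn_D]
  by_cases hb : k + 1 < poly.length
  · have hbi : ((k : Nat) : Int) + 1 < (poly.length : Int) := by push_cast; omega
    rw [if_pos hbi, if_pos hb, pvSgn_A]
    have hc : ((k + 1 : Nat) : Int) - 1 = ((k : Nat) : Int) := by omega
    rw [hc]
    simp only [pvX]
    have hc2 : ((k + 1 : Nat) : Int) = ((k : Nat) : Int) + 1 := by omega
    rw [hc2]
    constructor
    · rintro ⟨h1, h2⟩; exact ⟨h2, h1⟩
    · rintro ⟨h1, h2⟩; exact ⟨h2, h1⟩
  · have hbi : ¬ (((k : Nat) : Int) + 1 < (poly.length : Int)) := by push_cast; omega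
    rw [if_neg hbi, if_neg hb, pvSgn_A]
    have hk1 : k = poly.length - 1 := by omega
    have hm : ((0 : Nat) : Int) - 1 = (-1 : Int) := by omega
    rw [hm, pvX_neg_one poly hne]
    have hc : (poly.length : Int) - 1 = ((k : Nat) : Int) := by omega
    rw [hc]
    simp only [pvX, Nat.cast_zero]
    constructor
    · rintro ⟨h1, h2⟩; exact ⟨h2, h1⟩
    · rintro ⟨h1, h2⟩; exact ⟨h2, h1⟩

theorem poly_monotonic_x_eq (poly : List (Int × Int)) :
    poly_monotonic_x poly = poly_monotonic_x_alt poly := by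
  unfold poly_monotonic_x poly_monotonic_x_alt
  by_cases hne : poly = []
  · subst hne; rfl
  · simp only []
    rw [pvA_count poly, pvAlt_count poly hne]
    simp

-- ===== VERDICT (by name: the statement is the Claim_ definition above) =====
theorem poly_monotonic_x_spec : Claim_equal_poly_monotonic_x := by
  intro poly _
  unfold Spec_poly_monotonic_x
  exact poly_monotonic_x_eq poly
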